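-- pv_equiv track=rewrite | github.com/khangnm1340/data-mining-nhom-4-reddit-sentiment | extra/run_pipeline.py | detect_categories
-- ===== SOURCE A (Python) =====
-- from typing import List, Dict, Any, Tuple
--
-- CATEGORY_SUBS = {
--     "headphones": {"r/headphones", "r/BudgetAudiophile"},
--     "laptops_mac": {"r/GamingLaptops", "r/laptops", "r/macbookpro", "r/mac"},
--     "phones_apple": {"r/iphone", "r/AppleWatch"},
--     "monitors": {"r/Monitors"},
--     "home_av_iot": {"r/hometheater", "r/HomeDecorating", "r/SmartThings"},
--     "photography": {"r/photography"},
--     "pc_homelab_keyboards": {"r/PcBuild", "r/homelab", "r/ErgoMechKeyboards"},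
-- }
--
-- def detect_categories(subs: List[str]) -> List[str]:
--     cats = set()
--     for s in subs:
--         key = s if s.startswith("r/") else f"r/{s}"
--         for cat, sset in CATEGORY_SUBS.items():
--             if key in sset:
--                 cats.add(cat)
--     return sorted(cats)
-- ===== SOURCE B (Python) =====
-- from typing import List
--
-- # Reverse index: each subreddit maps to its single category (the sets in
-- # CATEGORY_SUBS are disjoint), so one dict lookup replaces the scan over
-- # all categories.
-- SUB2CAT = {
--     "r/headphones": "headphones",
--     "r/BudgetAudiophile": "headphones",
--     "r/GamingLaptops": "laptops_mac",
--     "r/laptops": "laptops_mac",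
--     "r/macbookpro": "laptops_mac",
--     "r/mac": "laptops_mac",
--     "r/iphone": "phones_apple",
--     "r/AppleWatch": "phones_apple",
--     "r/Monitors": "monitors",
--     "r/hometheater": "home_av_iot",
--     "r/HomeDecorating": "home_av_iot",
--     "r/SmartThings": "home_av_iot",
--     "r/photography": "photography",
--     "r/PcBuild": "pc_homelab_keyboards",
--     "r/homelab": "pc_homelab_keyboards",
--     "r/ErgoMechKeyboards": "pc_homelab_keyboards",
-- }
--
-- def detect_categories(subs: List[str]) -> List[str]:
--     found = set()
--     for s in subs:
--         key = s if s.startswith("r/") else f"r/{s}"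
--         cat = SUB2CAT.get(key)
--         if cat is not None:
--             found.add(cat)
--     return sorted(found)
-- ===== Notes on version B (the rewrite author's own statement) =====
-- stated objective: faster
-- what changed: Replaced the per-subreddit inner scan over all categories with a reverse index dict (subreddit -> its unique category, the sets being disjoint), so each input does one dict lookup instead of seven set-membership tests.
import Mathlib
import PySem

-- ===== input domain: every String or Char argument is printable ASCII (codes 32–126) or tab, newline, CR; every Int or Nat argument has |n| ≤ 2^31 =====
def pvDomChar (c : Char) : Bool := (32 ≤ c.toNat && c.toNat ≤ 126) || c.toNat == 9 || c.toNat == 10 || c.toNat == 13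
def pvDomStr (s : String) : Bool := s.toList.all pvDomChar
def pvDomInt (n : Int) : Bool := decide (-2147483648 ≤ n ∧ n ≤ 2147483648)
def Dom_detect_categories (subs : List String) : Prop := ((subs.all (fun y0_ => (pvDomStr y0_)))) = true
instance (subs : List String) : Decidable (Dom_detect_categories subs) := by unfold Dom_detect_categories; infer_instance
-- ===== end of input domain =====

-- B replaces A's inner scan over all categories by a reverse index (subreddit -> category); simpler per-element step, same results since the category sets are disjoint.

-- ===== PORT A =====
-- CATEGORY_SUBS: categories in dict insertion order, each with its set of subreddits (as char lists).
def pvCatSubs : List (String × List (List Char)) := [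
  ("headphones", ["r/headphones".toList, "r/BudgetAudiophile".toList]),
  ("laptops_mac", ["r/GamingLaptops".toList, "r/laptops".toList, "r/macbookpro".toList, "r/mac".toList]),
  ("phones_apple", ["r/iphone".toList, "r/AppleWatch".toList]),
  ("monitors", ["r/Monitors".toList]),
  ("home_av_iot", ["r/hometheater".toList, "r/HomeDecorating".toList, "r/SmartThings".toList]),
  ("photography", ["r/photography".toList]),
  ("pc_homelab_keyboards", ["r/PcBuild".toList, "r/homelab".toList, "r/ErgoMechKeyboards".toList])
]

-- loop body of A: key = s if s.startswith("r/") else "r/"+s; scan all categories, add cat if key in its set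
def pvStepA (cats : PySem.Set String) (s : String) : PySem.Set String :=
  let key : List Char := if PySem.Str.startswith s "r/" then s.toList else 'r' :: '/' :: s.toList
  pvCatSubs.foldl (fun cats p => if p.2.contains key then PySem.Set.add cats p.1 else cats) cats

def detect_categories (subs : List String) : List String :=
  PySem.List.sorted (subs.foldl pvStepA PySem.Set.empty) (fun x => x) false

-- ===== PORT B =====
-- SUB2CAT: the reverse index, one entry per subreddit.
def pvSub2Cat : PySem.Dict (List Char) String := ⟨[
  ("r/headphones".toList, "headphones"),
  ("r/BudgetAudiophile".toList, "headphones"),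
  ("r/GamingLaptops".toList, "laptops_mac"),
  ("r/laptops".toList, "laptops_mac"),
  ("r/macbookpro".toList, "laptops_mac"),
  ("r/mac".toList, "laptops_mac"),
  ("r/iphone".toList, "phones_apple"),
  ("r/AppleWatch".toList, "phones_apple"),
  ("r/Monitors".toList, "monitors"),
  ("r/hometheater".toList, "home_av_iot"),
  ("r/HomeDecorating".toList, "home_av_iot"),
  ("r/SmartThings".toList, "home_av_iot"),
  ("r/photography".toList, "photography"),
  ("r/PcBuild".toList, "pc_homelab_keyboards"),
  ("r/homelab".toList, "pc_homelab_keyboards"),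
  ("r/ErgoMechKeyboards".toList, "pc_homelab_keyboards")
]⟩

-- loop body of B: one dict lookup; add the found category (if any)
def pvStepB (cats : PySem.Set String) (s : String) : PySem.Set String :=
  let key : List Char := if PySem.Str.startswith s "r/" then s.toList else 'r' :: '/' :: s.toList
  match PySem.Dict.get? pvSub2Cat key with
  | some c => PySem.Set.add cats c
  | none => cats

def detect_categories_alt (subs : List String) : List String :=
  PySem.List.sorted (subs.foldl pvStepB PySem.Set.empty) (fun x => x) false

-- ===== PRECONDITION & SPEC =====
def Spec_detect_categories (subs : List String) (out : List String) : Prop := out = detect_categories_alt subs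
instance (subs : List String) (out : List String) : Decidable (Spec_detect_categories subs out) := by unfold Spec_detect_categories; infer_instance

-- ===== CLAIM (what is proved, stated in full; the proofs are below) =====
def Claim_equal_detect_categories : Prop := ∀ (subs : List String), Dom_detect_categories subs → Spec_detect_categories subs (detect_categories subs)

-- ===== LEMMAS AND PROOFS =====

-- The per-element steps agree: the 16 subreddit keys are pairwise distinct, so the
-- category scan fires on exactly the entry the reverse index returns.
theorem pvStep_eq (cats : PySem.Set String) (s : String) : pvStepA cats s = pvStepB cats s := by
  unfold pvStepA pvStepB
  generalize (if PySem.Str.startswith s "r/" then s.toList else 'r' :: '/' :: s.toList) = key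
  by_cases h1 : key = ['r', '/', 'h', 'e', 'a', 'd', 'p', 'h', 'o', 'n', 'e', 's']
  · subst h1; rfl
  by_cases h2 : key = ['r', '/', 'B', 'u', 'd', 'g', 'e', 't', 'A', 'u', 'd', 'i', 'o', 'p', 'h', 'i', 'l', 'e']
  · subst h2; rfl
  by_cases h3 : key = ['r', '/', 'G', 'a', 'm', 'i', 'n', 'g', 'L', 'a', 'p', 't', 'o', 'p', 's']
  · subst h3; rfl
  by_cases h4 : key = ['r', '/', 'l', 'a', 'p', 't', 'o', 'p', 's']
  · subst h4; rfl
  by_cases h5 : key = ['r', '/', 'm', 'a', 'c', 'b', 'o', 'o', 'k', 'p', 'r', 'o']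
  · subst h5; rfl
  by_cases h6 : key = ['r', '/', 'm', 'a', 'c']
  · subst h6; rfl
  by_cases h7 : key = ['r', '/', 'i', 'p', 'h', 'o', 'n', 'e']
  · subst h7; rfl
  by_cases h8 : key = ['r', '/', 'A', 'p', 'p', 'l', 'e', 'W', 'a', 't', 'c', 'h']
  · subst h8; rfl
  by_cases h9 : key = ['r', '/', 'M', 'o', 'n', 'i', 't', 'o', 'r', 's']
  · subst h9; rfl
  by_cases h10 : key = ['r', '/', 'h', 'o', 'm', 'e', 't', 'h', 'e', 'a', 't', 'e', 'r']
  · subst h10; rfl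
  by_cases h11 : key = ['r', '/', 'H', 'o', 'm', 'e', 'D', 'e', 'c', 'o', 'r', 'a', 't', 'i', 'n', 'g']
  · subst h11; rfl
  by_cases h12 : key = ['r', '/', 'S', 'm', 'a', 'r', 't', 'T', 'h', 'i', 'n', 'g', 's']
  · subst h12; rfl
  by_cases h13 : key = ['r', '/', 'p', 'h', 'o', 't', 'o', 'g', 'r', 'a', 'p', 'h', 'y']
  · subst h13; rfl
  by_cases h14 : key = ['r', '/', 'P', 'c', 'B', 'u', 'i', 'l', 'd']
  · subst h14; rfl
  by_cases h15 : key = ['r', '/', 'h', 'o', 'm', 'e', 'l', 'a', 'b']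
  · subst h15; rfl
  by_cases h16 : key = ['r', '/', 'E', 'r', 'g', 'o', 'M', 'e', 'c', 'h', 'K', 'e', 'y', 'b', 'o', 'a', 'r', 'd', 's']
  · subst h16; rfl
  have hfind : (pvSub2Cat.items.find? (fun p => p.1 == key)) = none := by
    simp [pvSub2Cat, Ne.symm h1, Ne.symm h2, Ne.symm h3, Ne.symm h4, Ne.symm h5, Ne.symm h6, Ne.symm h7, Ne.symm h8, Ne.symm h9, Ne.symm h10, Ne.symm h11, Ne.symm h12, Ne.symm h13, Ne.symm h14, Ne.symm h15, Ne.symm h16]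
  simp [pvCatSubs, PySem.Dict.get?, hfind, h1, h2, h3, h4, h5, h6, h7, h8, h9, h10, h11, h12, h13, h14, h15, h16]

theorem pvFoldl_eq (subs : List String) (cats : PySem.Set String) :
    subs.foldl pvStepA cats = subs.foldl pvStepB cats := by
  induction subs generalizing cats with
  | nil => rfl
  | cons s rest ih => simp only [List.foldl_cons, pvStep_eq, ih]

-- ===== VERDICT (by name: the statement is the Claim_ definition above) =====
theorem detect_categories_spec : Claim_equal_detect_categories := by
  intro subs _
  unfold Spec_detect_categories detect_categories detect_categories_alt
  rw [pvFoldl_eq]
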